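-- pv_equiv track=rewrite | github.com/lockon-n/ROLL | roll/pipeline/agentic/env_manager/mcbots_env_manager.py | _extract_response_token_ranges
-- ===== SOURCE A (Python) =====
-- from typing import Dict, List, Optional, Tuple
--
-- def _extract_response_token_ranges(response_masks: List[int]) -> List[List[int]]:
--     """Extract [start, end) ranges for contiguous 1-regions in response_masks."""
--     ranges = []
--     in_region = False
--     start = 0
--     for i, v in enumerate(response_masks):
--         if v == 1 and not in_region:
--             start = i
--             in_region = True
--         elif v == 0 and in_region:
--             ranges.append([start, i])
--             in_region = False
--     if in_region:
--         ranges.append([start, len(response_masks)])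
--     return ranges
-- ===== SOURCE B (Python) =====
-- from typing import List
--
-- def _extract_response_token_ranges(response_masks: List[int]) -> List[List[int]]:
--     """Extract [start, end) ranges for contiguous 1-regions in response_masks."""
--     # Collect alternating boundary indices: an even-length edge list expects a 1
--     # (region start), an odd-length one expects a 0 (region end); pair them up.
--     edges = []
--     for i, v in enumerate(response_masks):
--         if v == 1 - len(edges) % 2:
--             edges.append(i)
--     if len(edges) % 2:
--         edges.append(len(response_masks))
--     return [edges[k:k + 2] for k in range(0, len(edges), 2)]
-- ===== Notes on version B (the rewrite author's own statement) =====
-- stated objective: alternative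
-- what changed: Replaces A's in_region/start state machine (flag plus pending-start variable, appending ranges as it goes) by collecting a single alternating list of boundary indices (even count expects a region start, odd expects an end) and pairing consecutive boundaries into [start, end) ranges in a final pass.
import Mathlib
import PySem

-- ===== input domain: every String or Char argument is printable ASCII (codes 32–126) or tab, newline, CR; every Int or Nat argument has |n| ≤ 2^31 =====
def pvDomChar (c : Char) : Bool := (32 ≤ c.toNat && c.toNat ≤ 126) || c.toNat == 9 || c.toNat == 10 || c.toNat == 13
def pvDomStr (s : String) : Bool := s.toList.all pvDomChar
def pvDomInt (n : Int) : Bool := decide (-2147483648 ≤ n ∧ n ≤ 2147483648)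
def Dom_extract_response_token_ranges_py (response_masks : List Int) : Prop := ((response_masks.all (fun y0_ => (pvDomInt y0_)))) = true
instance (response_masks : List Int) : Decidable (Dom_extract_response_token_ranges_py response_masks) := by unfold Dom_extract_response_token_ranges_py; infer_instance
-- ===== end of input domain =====

-- B replaces A's in_region/start state machine by an alternating boundary-index list that is
-- paired up afterwards (alternative decomposition, same linear cost).


-- ===== PORT A =====
def extract_response_token_ranges_py (response_masks : List Int) : List (List Int) :=
  let st := (PySem.List.enumerate response_masks 0).foldl
    (fun (acc : List (List Int) × Bool × Int) iv =>
      if iv.2 = 1 ∧ acc.2.1 = false then (acc.1, true, iv.1)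
      else if iv.2 = 0 ∧ acc.2.1 = true then (acc.1 ++ [[acc.2.2, iv.1]], false, acc.2.2)
      else acc) ([], false, 0)
  if st.2.1 then st.1 ++ [[st.2.2, (response_masks.length : Int)]] else st.1

-- ===== PORT B =====
-- helper: [edges[k:k+2] for k in range(0, len(edges), 2)]
def pairChunks : List Int → List (List Int)
  | a :: b :: rest => [a, b] :: pairChunks rest
  | _ => []

def extract_response_token_ranges_py_alt (response_masks : List Int) : List (List Int) :=
  let edges := (PySem.List.enumerate response_masks 0).foldl
    (fun (es : List Int) iv => if iv.2 = 1 - (es.length % 2 : Int) then es ++ [iv.1] else es) []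
  let edges2 := if edges.length % 2 = 1 then edges ++ [(response_masks.length : Int)] else edges
  pairChunks edges2

-- ===== PRECONDITION & SPEC =====
def Spec_extract_response_token_ranges_py (response_masks : List Int) (out : List (List Int)) : Prop := out = extract_response_token_ranges_py_alt response_masks
instance (response_masks : List Int) (out : List (List Int)) : Decidable (Spec_extract_response_token_ranges_py response_masks out) := by unfold Spec_extract_response_token_ranges_py; infer_instance

-- ===== CLAIM (what is proved, stated in full; the proofs are below) =====
def Claim_equal_extract_response_token_ranges_py : Prop := ∀ (response_masks : List Int), Dom_extract_response_token_ranges_py response_masks → Spec_extract_response_token_ranges_py response_masks (extract_response_token_ranges_py response_masks)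

-- ===== LEMMAS AND PROOFS =====

lemma pairChunks_append_pair : ∀ (f : List Int), f.length % 2 = 0 → ∀ (a b : Int),
    pairChunks (f ++ [a, b]) = pairChunks f ++ [[a, b]]
  | [], _, a, b => by simp [pairChunks]
  | [x], h, a, b => by simp at h
  | x :: y :: rest, h, a, b => by
      simp only [List.length_cons] at h
      simp [pairChunks, pairChunks_append_pair rest (by omega) a b]

-- relation between A's fold state and B's edge list
def StRel (st : List (List Int) × Bool × Int) (es : List Int) : Prop :=
  (st.2.1 = false → es.length % 2 = 0 ∧ pairChunks es = st.1) ∧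
  (st.2.1 = true → ∃ f, es = f ++ [st.2.2] ∧ f.length % 2 = 0 ∧ pairChunks f = st.1)

lemma strel_step (ranges : List (List Int)) (inr : Bool) (start : Int) (es : List Int)
    (i v : Int) (h : StRel (ranges, inr, start) es) :
    StRel (if v = 1 ∧ inr = false then (ranges, true, i)
           else if v = 0 ∧ inr = true then (ranges ++ [[start, i]], false, start)
           else (ranges, inr, start))
          (if v = 1 - ((es.length : Int) % 2) then es ++ [i] else es) := by
  cases inr with
  | false =>
      obtain ⟨hlen, hpc⟩ := h.1 rfl
      have hm : ((es.length : Int) % 2) = 0 := by omega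
      by_cases hv : v = 1
      · rw [if_pos ⟨hv, rfl⟩, if_pos (by omega)]
        exact ⟨by simp, fun _ => ⟨es, by simp, hlen, by simpa using hpc⟩⟩
      · rw [if_neg (by simp [hv]), if_neg (by simp), if_neg (by omega)]
        exact h
  | true =>
      obtain ⟨f, hesf, hlen, hpc⟩ := h.2 rfl
      have hfl : es.length = f.length + 1 := by simp [hesf]
      have hm : ((es.length : Int) % 2) = 1 := by omega
      by_cases hv : v = 0
      · rw [if_neg (by simp [hv]), if_pos ⟨hv, rfl⟩, if_pos (by omega)]
        refine ⟨fun _ => ⟨by simp [hfl]; omega, ?_⟩, by simp⟩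
        have hassoc : es ++ [i] = f ++ [start, i] := by simp [hesf]
        rw [hassoc, pairChunks_append_pair f hlen start i]
        simpa using hpc
      · rw [if_neg (by simp), if_neg (by simp [hv]), if_neg (by omega)]
        exact h

lemma strel_fold (l : List (Int × Int)) :
    ∀ (st : List (List Int) × Bool × Int) (es : List Int), StRel st es →
    StRel (l.foldl (fun (acc : List (List Int) × Bool × Int) iv =>
      if iv.2 = 1 ∧ acc.2.1 = false then (acc.1, true, iv.1)
      else if iv.2 = 0 ∧ acc.2.1 = true then (acc.1 ++ [[acc.2.2, iv.1]], false, acc.2.2)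
      else acc) st)
      (l.foldl (fun (es : List Int) iv => if iv.2 = 1 - (es.length % 2 : Int) then es ++ [iv.1] else es) es) := by
  induction l with
  | nil => intro st es h; simpa using h
  | cons p rest ih =>
      intro st es h
      obtain ⟨ranges, inr, start⟩ := st
      obtain ⟨i, v⟩ := p
      simp only [List.foldl_cons]
      exact ih _ _ (strel_step ranges inr start es i v h)

-- ===== VERDICT (by name: the statement is the Claim_ definition above) =====
theorem extract_response_token_ranges_py_spec : Claim_equal_extract_response_token_ranges_py := by
  intro rm _
  unfold Spec_extract_response_token_ranges_py extract_response_token_ranges_py extract_response_token_ranges_py_alt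
  have h := strel_fold (PySem.List.enumerate rm 0) ([], false, 0) [] (by constructor <;> simp [pairChunks])
  set stA := (PySem.List.enumerate rm 0).foldl
    (fun (acc : List (List Int) × Bool × Int) iv =>
      if iv.2 = 1 ∧ acc.2.1 = false then (acc.1, true, iv.1)
      else if iv.2 = 0 ∧ acc.2.1 = true then (acc.1 ++ [[acc.2.2, iv.1]], false, acc.2.2)
      else acc) ([], false, 0) with hstA
  set es := (PySem.List.enumerate rm 0).foldl
    (fun (es : List Int) iv => if iv.2 = 1 - (es.length % 2 : Int) then es ++ [iv.1] else es) [] with hes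
  obtain ⟨ranges, inr, start⟩ := stA
  cases inr with
  | false =>
      obtain ⟨hlen, hpc⟩ := h.1 rfl
      simp [hlen, hpc]
  | true =>
      obtain ⟨f, hesf, hlen, hpc⟩ := h.2 rfl
      have h2 : (f.length + 1) % 2 = 1 := by omega
      simp [hesf, h2, pairChunks_append_pair f hlen, hpc]
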